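-- pv_equiv track=rewrite | github.com/covertg/lunchtag | lunchtag/assignment.py | _get_repeats
-- ===== SOURCE A (Python) =====
-- def _get_repeats(proposal, prev_assignments):
--     out = []
--     for prop in proposal:
--         for prev in prev_assignments:
--             # prop and prev are both sets representing one "assignment." Their intersection should
--             # always have at most 1 person if prop is indeed a new assignment.
--             inter = prop.intersection(prev)
--             if len(inter) >= 2:
--                 out.append(inter)
--     return out
-- ===== SOURCE B (Python) =====
-- def _get_repeats(proposal, prev_assignments):
--     # Inverted index: member -> set of indices of previous assignments containing it.
--     where = {}
--     for j, prev in enumerate(prev_assignments):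
--         for x in prev:
--             where.setdefault(x, set()).add(j)
--     out = []
--     for prop in proposal:
--         # Candidate previous assignments sharing at least one member with prop.
--         cand = set()
--         for x in prop:
--             cand.update(where.get(x, ()))
--         for j in sorted(cand):
--             inter = prop & prev_assignments[j]
--             if len(inter) >= 2:
--                 out.append(inter)
--     return out
-- ===== Notes on version B (the rewrite author's own statement) =====
-- stated objective: alternative
-- what changed: Instead of intersecting every proposal with every previous assignment, B builds an inverted index from member to the indices of previous assignments containing it, takes per proposal the sorted union of candidate indices, and intersects only with those candidates; it trades an index-building pass for skipping non-overlapping previous assignments.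
import Mathlib
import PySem

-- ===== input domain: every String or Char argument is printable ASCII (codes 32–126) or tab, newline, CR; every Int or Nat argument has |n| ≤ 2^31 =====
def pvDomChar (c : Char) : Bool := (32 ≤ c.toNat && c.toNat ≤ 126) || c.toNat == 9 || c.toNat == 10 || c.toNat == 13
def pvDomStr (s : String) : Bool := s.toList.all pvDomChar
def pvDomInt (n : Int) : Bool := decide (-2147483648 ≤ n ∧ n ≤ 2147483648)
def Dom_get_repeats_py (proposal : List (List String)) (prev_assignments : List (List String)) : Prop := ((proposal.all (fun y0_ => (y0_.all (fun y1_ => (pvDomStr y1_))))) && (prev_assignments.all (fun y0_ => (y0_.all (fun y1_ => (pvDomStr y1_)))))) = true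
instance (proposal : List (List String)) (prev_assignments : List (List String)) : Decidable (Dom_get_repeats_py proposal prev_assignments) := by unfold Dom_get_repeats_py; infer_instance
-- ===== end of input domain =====

-- B replaces A's scan of all previous assignments per proposal by an inverted index
-- (member -> indices of previous assignments containing it), visiting only candidate overlaps
-- (a different algorithm of similar measured cost on dense inputs).


-- ===== PORT A =====
-- for prop in proposal: for prev in prev_assignments:
--   inter = prop.intersection(prev); if len(inter) >= 2: out.append(inter)
def get_repeats_py (proposal : List (List String)) (prev_assignments : List (List String)) : List (List String) :=
  proposal.foldl (fun out prop =>
    prev_assignments.foldl (fun out prev =>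
      let inter := PySem.Set.inter prop prev
      if 2 ≤ PySem.Set.len inter then out ++ [inter] else out) out) []

-- ===== PORT B =====
-- where.setdefault(x, set()).add(j)  ==  where[x] = where.get(x, set()) with j added
-- (Dict.insert overwrites in place, so the dict position matches setdefault's)
def grBuildIndex (prev_assignments : List (List String)) : PySem.Dict String (PySem.Set Int) :=
  (PySem.List.enumerate prev_assignments).foldl
    (fun d p => p.2.foldl
      (fun d x => d.insert x (PySem.Set.add (d.getD x PySem.Set.empty) p.1)) d)
    PySem.Dict.empty

def get_repeats_py_alt (proposal : List (List String)) (prev_assignments : List (List String)) : List (List String) :=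
  let idx := grBuildIndex prev_assignments
  proposal.foldl (fun out prop =>
    let cand := prop.foldl (fun s x => PySem.Set.update s (idx.getD x PySem.Set.empty)) PySem.Set.empty
    (PySem.List.sorted cand (fun j => j)).foldl (fun out j =>
      let inter := PySem.Set.inter prop (PySem.List.pyGetD prev_assignments j [])
      if 2 ≤ PySem.Set.len inter then out ++ [inter] else out) out) []

-- ===== PRECONDITION & SPEC =====
def Spec_get_repeats_py (proposal : List (List String)) (prev_assignments : List (List String)) (out : List (List String)) : Prop := out = get_repeats_py_alt proposal prev_assignments
instance (proposal : List (List String)) (prev_assignments : List (List String)) (out : List (List String)) : Decidable (Spec_get_repeats_py proposal prev_assignments out) := by unfold Spec_get_repeats_py; infer_instance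

-- ===== CLAIM (what is proved, stated in full; the proofs are below) =====
def Claim_equal_get_repeats_py : Prop := ∀ (proposal : List (List String)) (prev_assignments : List (List String)), Dom_get_repeats_py proposal prev_assignments → Spec_get_repeats_py proposal prev_assignments (get_repeats_py proposal prev_assignments)

-- ===== LEMMAS AND PROOFS =====

-- the candidate-index list B visits for one proposal, in ascending order
def grT (prop : List String) (prevs : List (List String)) : List Int :=
  ((List.range prevs.length).filter
    (fun jn => prop.any (fun x => decide (x ∈ prevs.getD jn [])))).map (fun jn => Int.ofNat jn)

-- membership in the index after processing one previous assignment q with index j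
lemma gr_inner_mem (q : List String) : ∀ (d : PySem.Dict String (PySem.Set Int)) (j i : Int) (x : String),
    i ∈ (q.foldl (fun d x => d.insert x (PySem.Set.add (d.getD x PySem.Set.empty) j)) d).getD x PySem.Set.empty
      ↔ i ∈ d.getD x PySem.Set.empty ∨ (i = j ∧ x ∈ q) := by
  induction q with
  | nil => simp
  | cons y t ih =>
    intro d j i x
    simp only [List.foldl_cons, ih, PySem.Dict.getD_insert]
    by_cases hxy : x = y
    · subst hxy
      simp [PySem.Set.mem_add]
      tauto
    · simp [hxy]

-- membership in the index built from `enumerate prevs s`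
lemma gr_enum_mem (prevs : List (List String)) : ∀ (s : Int) (d : PySem.Dict String (PySem.Set Int)) (x : String) (i : Int),
    i ∈ ((PySem.List.enumerate prevs s).foldl
        (fun d p => p.2.foldl (fun d x => d.insert x (PySem.Set.add (d.getD x PySem.Set.empty) p.1)) d) d).getD x PySem.Set.empty
      ↔ i ∈ d.getD x PySem.Set.empty ∨ ∃ jn : Nat, jn < prevs.length ∧ i = s + jn ∧ x ∈ prevs.getD jn [] := by
  induction prevs with
  | nil => simp [PySem.List.enumerate]
  | cons q t ih =>
    intro s d x i
    have he : PySem.List.enumerate (q :: t) s = (s, q) :: PySem.List.enumerate t (s+1) := rfl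
    rw [he]
    simp only [List.foldl_cons, ih, gr_inner_mem]
    constructor
    · rintro ((h|⟨rfl,hq⟩)|⟨jn,hlt,rfl,hx⟩)
      · exact Or.inl h
      · exact Or.inr ⟨0, by simp, by simp, by simpa using hq⟩
      · exact Or.inr ⟨jn+1, by simpa using hlt, by push_cast; ring, by simpa using hx⟩
    · rintro (h|⟨jn,hlt,rfl,hx⟩)
      · exact Or.inl (Or.inl h)
      · cases jn with
        | zero => exact Or.inl (Or.inr ⟨by simp, by simpa using hx⟩)
        | succ m => exact Or.inr ⟨m, by simp only [List.length_cons] at hlt; omega, by push_cast; ring, by simpa using hx⟩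

lemma gr_index_mem (prevs : List (List String)) (x : String) (i : Int) :
    i ∈ (grBuildIndex prevs).getD x PySem.Set.empty
      ↔ ∃ jn : Nat, jn < prevs.length ∧ i = (jn : Int) ∧ x ∈ prevs.getD jn [] := by
  unfold grBuildIndex
  rw [gr_enum_mem]
  simp [PySem.Dict.getD_empty, PySem.Set.empty]

lemma gr_cand_mem (prop : List String) (g : String → PySem.Set Int) : ∀ (s0 : PySem.Set Int) (i : Int),
    i ∈ prop.foldl (fun s x => PySem.Set.update s (g x)) s0 ↔ i ∈ s0 ∨ ∃ x ∈ prop, i ∈ g x := by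
  induction prop with
  | nil => simp
  | cons y t ih =>
    intro s0 i
    simp only [List.foldl_cons, ih, PySem.Set.mem_update, List.mem_cons]
    constructor
    · rintro ((h|h)|⟨x,hx,h⟩)
      · exact Or.inl h
      · exact Or.inr ⟨y, Or.inl rfl, h⟩
      · exact Or.inr ⟨x, Or.inr hx, h⟩
    · rintro (h|⟨x,(rfl|hx),h⟩)
      · exact Or.inl (Or.inl h)
      · exact Or.inl (Or.inr h)
      · exact Or.inr ⟨x, hx, h⟩

lemma gr_cand_nodup (prop : List String) (g : String → PySem.Set Int) : ∀ (s0 : PySem.Set Int) (_ : s0.Nodup),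
    (prop.foldl (fun s x => PySem.Set.update s (g x)) s0).Nodup := by
  induction prop with
  | nil => intro s0 h; exact h
  | cons y t ih => intro s0 h; exact ih _ (PySem.Set.nodup_update _ _ h)

lemma gr_T_pairwise (prop : List String) (prevs : List (List String)) :
    (grT prop prevs).Pairwise (· < ·) := by
  unfold grT
  refine List.Pairwise.map _ (fun a b h => ?_) ((List.pairwise_lt_range.sublist List.filter_sublist))
  simpa using Int.ofNat_lt.mpr h

lemma gr_T_mem (prop : List String) (prevs : List (List String)) (i : Int) :
    i ∈ grT prop prevs ↔ ∃ jn : Nat, jn < prevs.length ∧ i = (jn : Int) ∧ ∃ x ∈ prop, x ∈ prevs.getD jn [] := by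
  unfold grT
  simp only [List.mem_map, List.mem_filter, List.mem_range, List.any_eq_true, decide_eq_true_eq]
  constructor
  · rintro ⟨jn, ⟨hlt, hx⟩, rfl⟩
    exact ⟨jn, hlt, rfl, hx⟩
  · rintro ⟨jn, hlt, rfl, hx⟩
    exact ⟨jn, ⟨hlt, hx⟩, rfl⟩

lemma gr_T_nodup (prop : List String) (prevs : List (List String)) :
    (grT prop prevs).Nodup :=
  (gr_T_pairwise prop prevs).imp (fun h => ne_of_lt h)

-- B's sorted candidate list is exactly grT
lemma gr_sorted_cand (prop : List String) (prevs : List (List String)) :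
    PySem.List.sorted
      (prop.foldl (fun s x => PySem.Set.update s ((grBuildIndex prevs).getD x PySem.Set.empty)) PySem.Set.empty)
      (fun j => j) = grT prop prevs := by
  apply PySem.List.sorted_eq_of_perm_of_pairwise_lt
  · rw [List.perm_ext_iff_of_nodup (gr_T_nodup prop prevs)
      (gr_cand_nodup prop _ PySem.Set.empty List.nodup_nil)]
    intro i
    rw [gr_T_mem, gr_cand_mem]
    constructor
    · rintro ⟨jn, hlt, rfl, x, hxp, hx⟩
      exact Or.inr ⟨x, hxp, (gr_index_mem prevs x _).mpr ⟨jn, hlt, rfl, hx⟩⟩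
    · rintro (h | ⟨x, hxp, hi⟩)
      · exact absurd h (List.not_mem_nil)
      · obtain ⟨jn, hlt, rfl, hx⟩ := (gr_index_mem prevs x i).mp hi
        exact ⟨jn, hlt, rfl, x, hxp, hx⟩
  · exact gr_T_pairwise prop prevs

lemma gr_range_filter_map {β : Type} (l : List (List String)) (p : List String → Bool) (f : List String → β) :
    ((List.range l.length).filter (fun j => p (l.getD j []))).map (fun j => f (l.getD j []))
      = (l.filter p).map f := by
  induction l with
  | nil => simp
  | cons a t ih =>
    rw [List.length_cons, List.range_succ_eq_map]
    simp only [List.filter_cons, List.filter_map, Function.comp_def, List.getD_cons_succ,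
      List.getD_cons_zero]
    by_cases hp : p a
    · simp only [hp, if_true, List.map_cons, List.map_map, Function.comp_def, List.getD_cons_succ,
        List.getD_cons_zero]
      exact congrArg _ ih
    · simp only [hp, Bool.false_eq_true, if_false, List.map_map, Function.comp_def, List.getD_cons_succ]
      exact ih

-- an intersection of size >= 2 means some shared member (so the candidate filter loses nothing)
lemma gr_two_le_any (prop prev : List String) (h : 2 ≤ PySem.Set.len (PySem.Set.inter prop prev)) :
    prop.any (fun x => decide (x ∈ prev)) = true := by
  have hlen : 0 < (prop.filter (fun x => prev.contains x)).length := by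
    have : (2 : Int) ≤ ((prop.filter (fun x => prev.contains x)).length : Int) := h
    omega
  obtain ⟨x, hx⟩ := List.exists_mem_of_length_pos hlen
  rw [List.mem_filter] at hx
  refine List.any_eq_true.mpr ⟨x, hx.1, ?_⟩
  simpa using hx.2

-- per-proposal agreement of the two inner loops
lemma gr_prop_eq (prop : List String) (prevs : List (List String)) :
    ((grT prop prevs).filter
        (fun j => decide (2 ≤ PySem.Set.len (PySem.Set.inter prop (PySem.List.pyGetD prevs j []))))).map
      (fun j => PySem.Set.inter prop (PySem.List.pyGetD prevs j []))
    = ((prevs.filter (fun prev => decide (2 ≤ PySem.Set.len (PySem.Set.inter prop prev)))).map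
        (PySem.Set.inter prop)) := by
  unfold grT
  rw [List.filter_map, List.map_map, List.filter_filter]
  simp only [Function.comp_def, Int.ofNat_eq_natCast, PySem.List.pyGetD_natCast]
  rw [List.filter_congr (q := fun jn => decide (2 ≤ PySem.Set.len (PySem.Set.inter prop (prevs.getD jn []))))
    (fun jn _ => by
      cases hc : decide (2 ≤ PySem.Set.len (PySem.Set.inter prop (prevs.getD jn []))) with
      | true =>
        simp only [Bool.true_and]
        rw [gr_two_le_any prop _ (of_decide_eq_true hc)]
        exact hc.symm
      | false =>
        simp only [Bool.false_and]
        exact hc.symm)]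
  exact gr_range_filter_map prevs
    (fun prev => decide (2 ≤ PySem.Set.len (PySem.Set.inter prop prev))) (PySem.Set.inter prop)

-- ===== VERDICT (by name: the statement is the Claim_ definition above) =====
theorem get_repeats_py_spec : Claim_equal_get_repeats_py := by
  intro proposal prevs _
  unfold Spec_get_repeats_py
  have hA : get_repeats_py proposal prevs
      = proposal.foldl (fun out prop => out ++ ((prevs.filter (fun prev => decide (2 ≤ PySem.Set.len (PySem.Set.inter prop prev)))).map (PySem.Set.inter prop))) [] := by
    unfold get_repeats_py
    exact PySem.List.foldl_congr_mem proposal _ _ []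
      (fun out prop _ => PySem.List.foldl_append_ite
        (p := fun prev => 2 ≤ PySem.Set.len (PySem.Set.inter prop prev)) (PySem.Set.inter prop) prevs out)
  have hB : get_repeats_py_alt proposal prevs
      = proposal.foldl (fun out prop => out ++ ((prevs.filter (fun prev => decide (2 ≤ PySem.Set.len (PySem.Set.inter prop prev)))).map (PySem.Set.inter prop))) [] := by
    unfold get_repeats_py_alt
    exact PySem.List.foldl_congr_mem proposal _ _ []
      (fun out prop _ => by
        show (PySem.List.sorted
          (prop.foldl (fun s x => PySem.Set.update s ((grBuildIndex prevs).getD x PySem.Set.empty)) PySem.Set.empty)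
          (fun j => j)).foldl _ out = _
        rw [gr_sorted_cand prop prevs,
          PySem.List.foldl_append_ite
            (p := fun j => 2 ≤ PySem.Set.len (PySem.Set.inter prop (PySem.List.pyGetD prevs j [])))
            (fun j => PySem.Set.inter prop (PySem.List.pyGetD prevs j [])) (grT prop prevs) out,
          gr_prop_eq prop prevs])
  exact hA.trans hB.symm
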